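-- pv_equiv track=rewrite | github.com/josedsilva20/Programming-fundamentals | labs/Resoluções/Lab06-07/ex03.py | implode
-- ===== SOURCE A (Python) =====
-- def implode(tuplo):
--     res = 0
--
--     if not isinstance(tuplo, tuple):
--         raise ValueError("Não é tuplo")
--
--     for i in (tuplo):
--         if not isinstance(i, int):
--             raise ValueError("Não tem todos elementos como algarismos")
--
--         else:
--             res = res * 10 + i
--
--     return res
-- ===== SOURCE B (Python) =====
-- def implode(tuplo):
--     # Validation pass (same exceptions/messages as the original)
--     if not isinstance(tuplo, tuple):
--         raise ValueError("Não é tuplo")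
--     for i in tuplo:
--         if not isinstance(i, int):
--             raise ValueError("Não tem todos elementos como algarismos")
--     # Computation pass: least-significant-first accumulation with explicit weights
--     res = 0
--     mult = 1
--     for d in reversed(tuplo):
--         res += d * mult
--         mult *= 10
--     return res
-- ===== Notes on version B (the rewrite author's own statement) =====
-- stated objective: alternative
-- what changed: Replaces the single Horner left-fold (res = res*10 + i, validation interleaved) by a separate validation pass followed by a reversed-order accumulation with an explicit running power-of-ten weight (res += d*mult; mult *= 10).
import Mathlib
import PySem

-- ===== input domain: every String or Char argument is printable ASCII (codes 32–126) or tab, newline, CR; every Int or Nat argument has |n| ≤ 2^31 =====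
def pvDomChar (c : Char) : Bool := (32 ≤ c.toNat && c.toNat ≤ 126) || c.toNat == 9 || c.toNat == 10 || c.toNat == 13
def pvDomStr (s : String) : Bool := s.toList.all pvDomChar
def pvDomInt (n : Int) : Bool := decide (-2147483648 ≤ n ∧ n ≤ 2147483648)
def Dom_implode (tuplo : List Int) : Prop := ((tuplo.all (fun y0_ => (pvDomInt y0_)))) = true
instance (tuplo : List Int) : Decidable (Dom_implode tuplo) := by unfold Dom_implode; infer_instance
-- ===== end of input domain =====

-- B differs from A only in decomposition; the isinstance checks of both Pythons are
-- guaranteed by the Lean types (tuplo : List Int) and so never raise here.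

-- ===== PORT A =====
-- Horner left-fold: res = res * 10 + i over the tuple in order.
def implode (tuplo : List Int) : Int :=
  tuplo.foldl (fun res i => res * 10 + i) 0

-- ===== PORT B =====
-- Reversed-order loop with state (res, mult): res += d*mult; mult *= 10.
def implode_alt (tuplo : List Int) : Int :=
  (tuplo.reverse.foldl (fun st d => (st.1 + d * st.2, st.2 * 10)) ((0 : Int), (1 : Int))).1

-- ===== PRECONDITION & SPEC =====
def Spec_implode (tuplo : List Int) (out : Int) : Prop := out = implode_alt tuplo
instance (tuplo : List Int) (out : Int) : Decidable (Spec_implode tuplo out) := by unfold Spec_implode; infer_instance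

-- ===== CLAIM (what is proved, stated in full; the proofs are below) =====
def Claim_equal_implode : Prop := ∀ (tuplo : List Int), Dom_implode tuplo → Spec_implode tuplo (implode tuplo)

-- ===== LEMMAS AND PROOFS =====
theorem implode_rev_fold (l : List Int) : ∀ (r m : Int),
    (l.reverse.foldl (fun st d => (st.1 + d * st.2, st.2 * 10)) (r, m)).1
      = r + m * l.foldl (fun res i => res * 10 + i) 0 := by
  induction l using List.reverseRecOn with
  | nil => intro r m; simp
  | append_singleton l d ih =>
    intro r m
    rw [List.reverse_append]
    simp only [List.reverse_singleton, List.singleton_append, List.foldl_cons,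
      List.foldl_append, List.foldl_cons, List.foldl_nil]
    rw [ih]
    ring

-- ===== VERDICT (by name: the statement is the Claim_ definition above) =====
theorem implode_spec : Claim_equal_implode := by
  intro tuplo _
  unfold Spec_implode implode implode_alt
  rw [implode_rev_fold]
  ring
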